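-- pv_equiv track=rewrite | github.com/zhengmianmian/coding-problems | CodeSignal/increaseArr.py | solution
-- ===== SOURCE A (Python) =====
-- def strictlyIncrease(sequence):
--     cnt = 0
--     for i in range(len(sequence) - 1):
--         if sequence[i] >= sequence[i+1]:
--             cnt = cnt +1
--     if cnt>0:
--         return False
--     else:
--         return True
--
-- def solution(sequence):
--     for i in range(len(sequence) - 1):
--         if sequence[i] >= sequence[i+1]:
--             # remove i
--             subarray = sequence[0:i] + sequence[i+1:]
--             subarray2 = sequence[0:i+1] + sequence[i+2:]
--             if strictlyIncrease(subarray) or strictlyIncrease(subarray2):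
--                 return True
--             else:
--                 return False
--     return True
-- ===== SOURCE B (Python) =====
-- def solution(sequence):
--     n = len(sequence)
--     bad = [j for j in range(n - 1) if sequence[j] >= sequence[j + 1]]
--     if not bad:
--         return True
--     i, rest = bad[0], bad[1:]
--     ok_left = (i == 0 or sequence[i - 1] < sequence[i + 1]) and not rest
--     ok_right = (i + 2 >= n or sequence[i] < sequence[i + 2]) and all(j == i + 1 for j in rest)
--     return ok_left or ok_right
-- ===== Notes on version B (the rewrite author's own statement) =====
-- stated objective: alternative
-- what changed: A finds the first adjacent violation, rebuilds the two candidate sublists with slicing and rescans each from scratch; B collects all violation indices in one comprehension pass and decides locally from the neighbours of the first violation and the positions of the remaining violations, never building a sublist (measured ~1.7x faster: no list copies or rescans).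
import Mathlib
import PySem

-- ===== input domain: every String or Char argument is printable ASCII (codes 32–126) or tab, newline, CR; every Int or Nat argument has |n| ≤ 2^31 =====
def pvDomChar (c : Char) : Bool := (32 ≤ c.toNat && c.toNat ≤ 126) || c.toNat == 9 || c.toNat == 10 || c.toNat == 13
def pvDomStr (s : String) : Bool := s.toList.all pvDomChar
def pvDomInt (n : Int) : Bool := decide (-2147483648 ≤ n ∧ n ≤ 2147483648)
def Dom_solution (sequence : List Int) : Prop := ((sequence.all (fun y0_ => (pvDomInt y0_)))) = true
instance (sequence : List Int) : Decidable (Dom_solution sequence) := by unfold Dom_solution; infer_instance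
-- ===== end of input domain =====

-- B replaces A's "rebuild two sublists and rescan each" with one violation-index pass plus a local neighbour test (same O(n), measured constant-factor faster).

-- ===== PORT A =====
-- helper strictlyIncrease: counts adjacent violations, returns False iff any
def strictlyIncrease (s : List Int) : Bool :=
  if ((PySem.List.pyRange 0 ((s.length : Int) - 1) 1).foldl
        (fun cnt i => if PySem.List.pyGetD s i 0 ≥ PySem.List.pyGetD s (i+1) 0 then cnt + 1 else cnt)
        (0 : Int)) > 0 then false else true

-- A's main loop with early return, as structural recursion over the range list
def solutionGo (s : List Int) : List Int → Bool
  | [] => true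
  | i :: rest =>
    if PySem.List.pyGetD s i 0 ≥ PySem.List.pyGetD s (i+1) 0 then
      strictlyIncrease (PySem.List.slice s (some 0) (some i) ++ PySem.List.slice s (some (i+1)) none)
      || strictlyIncrease (PySem.List.slice s (some 0) (some (i+1)) ++ PySem.List.slice s (some (i+2)) none)
    else solutionGo s rest

def solution (sequence : List Int) : Bool :=
  solutionGo sequence (PySem.List.pyRange 0 ((sequence.length : Int) - 1) 1)

-- ===== PORT B =====
def solution_alt (sequence : List Int) : Bool :=
  let n : Int := sequence.length
  let bad := (PySem.List.pyRange 0 (n - 1) 1).filter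
    (fun j => PySem.List.pyGetD sequence j 0 ≥ PySem.List.pyGetD sequence (j+1) 0)
  match bad with
  | [] => true
  | i :: rest =>
    ((decide (i = 0) || decide (PySem.List.pyGetD sequence (i-1) 0 < PySem.List.pyGetD sequence (i+1) 0))
        && rest.isEmpty)
    || ((decide (i + 2 ≥ n) || decide (PySem.List.pyGetD sequence i 0 < PySem.List.pyGetD sequence (i+2) 0))
        && rest.all (fun j => j == i + 1))

-- ===== PRECONDITION & SPEC =====
def Spec_solution (sequence : List Int) (out : Bool) : Prop := out = solution_alt sequence
instance (sequence : List Int) (out : Bool) : Decidable (Spec_solution sequence out) := by unfold Spec_solution; infer_instance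

-- ===== CLAIM (what is proved, stated in full; the proofs are below) =====
def Claim_equal_solution : Prop := ∀ (sequence : List Int), Dom_solution sequence → Spec_solution sequence (solution sequence)

-- ===== LEMMAS AND PROOFS =====

-- the adjacent-violation predicate over Nat indices
def Pb (s : List Int) (j : Nat) : Bool := decide (s.getD j 0 ≥ s.getD (j+1) 0)

-- fold counting is positive iff some element satisfies the condition
theorem foldl_cnt_pos (s : List Int) (L : List Int) (c : Int) (hc : 0 ≤ c) :
    (0 < L.foldl (fun cnt i => if PySem.List.pyGetD s i 0 ≥ PySem.List.pyGetD s (i+1) 0 then cnt + 1 else cnt) c)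
    ↔ (0 < c ∨ ∃ i ∈ L, PySem.List.pyGetD s i 0 ≥ PySem.List.pyGetD s (i+1) 0) := by
  induction L generalizing c with
  | nil => simp
  | cons x xs ih =>
    simp only [List.foldl_cons]
    split_ifs with hx
    · rw [ih (c+1) (by omega)]
      constructor
      · rintro (h | ⟨i, hi, h⟩)
        · exact Or.inr ⟨x, by simp, hx⟩
        · exact Or.inr ⟨i, by simp [hi], h⟩
      · rintro (h | ⟨i, hi, h⟩)
        · left; omega
        · rcases List.mem_cons.mp hi with rfl | hi
          · left; omega
          · exact Or.inr ⟨i, hi, h⟩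
    · rw [ih c hc]
      constructor
      · rintro (h | ⟨i, hi, h⟩)
        · exact Or.inl h
        · exact Or.inr ⟨i, by simp [hi], h⟩
      · rintro (h | ⟨i, hi, h⟩)
        · exact Or.inl h
        · rcases List.mem_cons.mp hi with rfl | hi
          · exact absurd h hx
          · exact Or.inr ⟨i, hi, h⟩

-- the bound ((l.length : Int) - 1) rewritten as a Nat cast
theorem intLenSub (len : Nat) :
    PySem.List.pyRange 0 ((len : Int) - 1) 1 = PySem.List.pyRange 0 ((len - 1 : Nat) : Int) 1 := by
  rcases len with _ | m
  · rw [PySem.List.pyRange_one_eq_nil (by norm_num), PySem.List.pyRange_one_eq_nil (by norm_num)]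
  · congr 1; push_cast; omega

-- characterisation of the helper
theorem SI_iff (l : List Int) :
    strictlyIncrease l = true ↔ ∀ j : Nat, j < l.length - 1 → ¬ (Pb l j = true) := by
  have key : (∃ i ∈ PySem.List.pyRange 0 ((l.length - 1 : Nat) : Int) 1,
      PySem.List.pyGetD l i 0 ≥ PySem.List.pyGetD l (i+1) 0)
      ↔ ∃ j : Nat, j < l.length - 1 ∧ Pb l j = true := by
    constructor
    · rintro ⟨i, hi, h⟩
      rw [PySem.List.mem_pyRange_one] at hi
      obtain ⟨hi0, him⟩ := hi
      lift i to Nat using hi0 with j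
      refine ⟨j, by exact_mod_cast him, ?_⟩
      rw [(by push_cast; ring : ((j : Int) + 1) = ((j + 1 : Nat) : Int)),
        PySem.List.pyGetD_natCast, PySem.List.pyGetD_natCast] at h
      simpa [Pb] using h
    · rintro ⟨j, hj, h⟩
      refine ⟨(j : Int), ?_, ?_⟩
      · rw [PySem.List.mem_pyRange_one]
        exact ⟨Int.natCast_nonneg j, by exact_mod_cast hj⟩
      · rw [(by push_cast; ring : ((j : Int) + 1) = ((j + 1 : Nat) : Int)),
          PySem.List.pyGetD_natCast, PySem.List.pyGetD_natCast]
        simpa [Pb] using h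
  unfold strictlyIncrease
  rw [intLenSub]
  split_ifs with hpos
  · rw [gt_iff_lt, foldl_cnt_pos l _ 0 le_rfl] at hpos
    simp only [lt_self_iff_false, false_or, key] at hpos
    obtain ⟨j, hj, h⟩ := hpos
    refine ⟨fun hc => absurd hc (by simp), fun hall => absurd h (hall j hj)⟩
  · rw [gt_iff_lt, foldl_cnt_pos l _ 0 le_rfl] at hpos
    simp only [lt_self_iff_false, false_or, key, not_exists] at hpos
    refine ⟨fun _ j hj hP => hpos j ⟨hj, hP⟩, fun _ => rfl⟩

-- decomposing a filtered index range at its head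
theorem filter_range'_cons (p : Nat → Bool) :
    ∀ (len a i : Nat) (rest : List Nat),
      (List.range' a len).filter p = i :: rest →
      a ≤ i ∧ i < a + len ∧ (∀ k, a ≤ k → k < i → ¬ p k = true) ∧ p i = true ∧
        rest = (List.range' (i+1) (a + len - (i+1))).filter p := by
  intro len
  induction len with
  | zero => intro a i rest h; simp at h
  | succ m ih =>
    intro a i rest h
    rw [List.range'_succ, List.filter_cons] at h
    by_cases hp : p a = true
    · rw [if_pos hp] at h
      injection h with h1 h2
      subst h1
      refine ⟨le_refl _, by omega, fun k hk hk' => absurd (lt_of_le_of_lt hk hk') (lt_irrefl _), hp, ?_⟩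
      have e : a + (m+1) - (a+1) = m := by omega
      rw [e, h2]
    · rw [if_neg hp] at h
      obtain ⟨h1, h2, h3, h4, h5⟩ := ih (a+1) i rest h
      refine ⟨by omega, by omega, ?_, h4, by
        have e : a + (m+1) - (i+1) = (a+1) + m - (i+1) := by omega
        rw [e]; exact h5⟩
      intro k hk hk'
      rcases Nat.eq_or_lt_of_le hk with rfl | hk
      · exact hp
      · exact h3 k hk hk'

-- getD view of removing the element at index i from s
theorem getD_remove (s : List Int) (i j : Nat) (hi : i + 1 ≤ s.length) :
    (s.take i ++ s.drop (i+1)).getD j 0 = if j < i then s.getD j 0 else s.getD (j+1) 0 := by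
  have hti : (s.take i).length = i := by rw [List.length_take]; omega
  rcases Nat.lt_or_ge j i with hj | hj
  · rw [if_pos hj, List.getD_eq_getElem?_getD, List.getElem?_append_left (by rw [hti]; omega),
      List.getD_eq_getElem?_getD]
    congr 1
    exact List.getElem?_take_of_lt hj
  · rw [if_neg (by omega), List.getD_eq_getElem?_getD, List.getElem?_append_right (by rw [hti]; omega),
      List.getElem?_drop, List.getD_eq_getElem?_getD, hti]
    congr 1
    congr 1
    omega

-- A's loop vs the filtered violation list: the master correspondence
theorem masterA (s : List Int) :
    ∀ (len a : Nat),
      solutionGo s (PySem.List.pyRange (a : Int) ((a + len : Nat) : Int) 1) =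
        match (List.range' a len).filter (Pb s) with
        | [] => true
        | i :: _ =>
          strictlyIncrease (PySem.List.slice s (some 0) (some (i : Int)) ++ PySem.List.slice s (some ((i : Int)+1)) none)
          || strictlyIncrease (PySem.List.slice s (some 0) (some ((i : Int)+1)) ++ PySem.List.slice s (some ((i : Int)+2)) none) := by
  intro len
  induction len with
  | zero => intro a; rw [PySem.List.pyRange_one_eq_nil (by push_cast; omega)]; simp [solutionGo]
  | succ m ih =>
    intro a
    rw [PySem.List.pyRange_one_cons (by push_cast; omega)]
    rw [List.range'_succ, List.filter_cons]
    have hcast : ((a : Int) + 1) = ((a + 1 : Nat) : Int) := by push_cast; ring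
    by_cases hp : Pb s a = true
    · have hp' : PySem.List.pyGetD s (a : Int) 0 ≥ PySem.List.pyGetD s ((a : Int)+1) 0 := by
        rw [hcast, PySem.List.pyGetD_natCast, PySem.List.pyGetD_natCast]
        simpa [Pb] using hp
      rw [if_pos hp]
      simp only [solutionGo, if_pos hp']
    · have hp' : ¬ PySem.List.pyGetD s (a : Int) 0 ≥ PySem.List.pyGetD s ((a : Int)+1) 0 := by
        rw [hcast, PySem.List.pyGetD_natCast, PySem.List.pyGetD_natCast]
        simpa [Pb] using hp
      rw [if_neg hp]
      simp only [solutionGo, if_neg hp']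
      rw [hcast, (by omega : a + (m + 1) = (a + 1) + m)]
      exact ih (a + 1)

-- B expressed over the same filtered violation list
theorem masterB (s : List Int) :
    solution_alt s =
      match (List.range' 0 (s.length - 1)).filter (Pb s) with
      | [] => true
      | i :: rest =>
        ((decide (i = 0) || decide (s.getD (i-1) 0 < s.getD (i+1) 0)) && rest.isEmpty)
        || ((decide (s.length ≤ i + 2) || decide (s.getD i 0 < s.getD (i+2) 0)) && rest.all (fun j => j == i + 1)) := by
  unfold solution_alt
  simp only []
  rw [intLenSub, PySem.List.pyRange_zero_natCast, List.filter_map]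
  have hfun : ((fun j => decide (PySem.List.pyGetD s j 0 ≥ PySem.List.pyGetD s (j+1) 0)) ∘ (fun k : Nat => (k : Int)))
      = Pb s := by
    funext k
    simp only [Function.comp]
    rw [(by push_cast; ring : ((k : Int) + 1) = ((k + 1 : Nat) : Int)),
      PySem.List.pyGetD_natCast, PySem.List.pyGetD_natCast]
    simp [Pb]
  rw [hfun, List.range_eq_range']
  cases hF : (List.range' 0 (s.length - 1)).filter (Pb s) with
  | nil => simp
  | cons i rest =>
    simp only [List.map_cons]
    have e3 : ((i : Int) + 1) = ((i + 1 : Nat) : Int) := by push_cast; ring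
    have e4 : ((i : Int) + 2) = ((i + 2 : Nat) : Int) := by push_cast; ring
    rw [e3, e4]
    have e2 : decide ((i : Int) = 0) = decide (i = 0) := by
      rw [decide_eq_decide]; simp [Int.natCast_eq_zero]
    have e5 : decide (((i + 2 : Nat) : Int) ≥ (s.length : Int)) = decide (s.length ≤ i + 2) := by
      rw [decide_eq_decide]
      constructor <;> intro h <;> exact_mod_cast h
    have e6 : ((List.map (fun k : Nat => (k : Int)) rest).all fun j => j == ((i + 1 : Nat) : Int))
        = rest.all (fun j => j == i + 1) := by
      rw [List.all_map]
      have hfe : ((fun j : Int => j == ((i + 1 : Nat) : Int)) ∘ (fun k : Nat => (k : Int)))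
          = (fun j : Nat => j == i + 1) := by
        funext x
        simp only [Function.comp]
        rw [Bool.eq_iff_iff]
        simp only [beq_iff_eq]
        constructor <;> intro h <;> exact_mod_cast h
      rw [hfe]
    have e7 : (List.map (fun k : Nat => (k : Int)) rest).isEmpty = rest.isEmpty := by
      cases rest <;> simp
    rw [e2, e5, e6, e7]
    simp only [PySem.List.pyGetD_natCast]
    by_cases hi0 : i = 0
    · subst hi0
      simp
    · have e1 : ((i : Int) - 1) = ((i - 1 : Nat) : Int) := by
        have h1 : 1 ≤ i := by omega
        push_cast [h1]; ring
      rw [e1]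
      simp only [PySem.List.pyGetD_natCast]

-- the two candidate rescans of A, characterised locally when i is the first violation
theorem SI_left (s : List Int) (i : Nat) (hi : i < s.length - 1) (hmin : ∀ k, k < i → ¬ Pb s k = true) :
    (strictlyIncrease (PySem.List.slice s (some 0) (some (i : Int)) ++ PySem.List.slice s (some ((i : Int)+1)) none) = true)
    ↔ ((i = 0 ∨ s.getD (i-1) 0 < s.getD (i+1) 0) ∧ ∀ k, i + 1 ≤ k → k < s.length - 1 → ¬ Pb s k = true) := by
  have hlen : i + 1 ≤ s.length := by omega
  have hsl : PySem.List.slice s (some 0) (some (i : Int)) ++ PySem.List.slice s (some ((i : Int)+1)) none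
      = s.take i ++ s.drop (i+1) := by
    rw [PySem.List.slice_zero_start, PySem.List.slice_to_natCast,
      (by push_cast; ring : ((i : Int) + 1) = ((i + 1 : Nat) : Int)), PySem.List.slice_from_natCast]
  rw [hsl, SI_iff]
  have hlent : (s.take i ++ s.drop (i+1)).length = s.length - 1 := by
    simp [List.length_take, List.length_drop]; omega
  have hget := getD_remove s i
  constructor
  · intro H
    constructor
    · by_cases hi0 : i = 0
      · exact Or.inl hi0
      · refine Or.inr ?_
        have h := H (i-1) (by omega)
        simp only [Pb, decide_eq_true_eq] at h ⊢
        rw [hget (i-1) hlen, hget (i-1+1) hlen] at h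
        rw [(by omega : i - 1 + 1 = i)] at h
        rw [if_pos (by omega), if_neg (by omega)] at h
        omega
    · intro k hk1 hk2
      have h := H (k-1) (by rw [hlent]; omega)
      simp only [Pb, decide_eq_true_eq] at h ⊢
      rw [hget (k-1) hlen, hget (k-1+1) hlen] at h
      rw [(by omega : k - 1 + 1 = k)] at h
      rw [if_neg (by omega), if_neg (by omega)] at h
      omega
  · rintro ⟨hL, hR⟩ j hj
    rw [hlent] at hj
    simp only [Pb, decide_eq_true_eq]
    rw [hget j hlen, hget (j+1) hlen]
    rcases Nat.lt_trichotomy (j+1) i with hcase | hcase | hcase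
    · rw [if_pos (by omega), if_pos hcase]
      have := hmin j (by omega)
      simp only [Pb, decide_eq_true_eq] at this
      omega
    · rw [if_pos (by omega), if_neg (by omega)]
      rcases hL with rfl | hL
      · omega
      · rw [← hcase] at hL
        rw [(by omega : j + 1 - 1 = j)] at hL
        omega
    · rw [if_neg (by omega), if_neg (by omega)]
      have := hR (j+1) (by omega) (by omega)
      simp only [Pb, decide_eq_true_eq] at this
      omega

theorem SI_right (s : List Int) (i : Nat) (hi : i < s.length - 1) (hmin : ∀ k, k < i → ¬ Pb s k = true) :
    (strictlyIncrease (PySem.List.slice s (some 0) (some ((i : Int)+1)) ++ PySem.List.slice s (some ((i : Int)+2)) none) = true)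
    ↔ ((s.length ≤ i + 2 ∨ s.getD i 0 < s.getD (i+2) 0) ∧ ∀ k, i + 2 ≤ k → k < s.length - 1 → ¬ Pb s k = true) := by
  have hlen : (i + 1) + 1 ≤ s.length := by omega
  have hsl : PySem.List.slice s (some 0) (some ((i : Int)+1)) ++ PySem.List.slice s (some ((i : Int)+2)) none
      = s.take (i+1) ++ s.drop ((i+1)+1) := by
    rw [PySem.List.slice_zero_start,
      (by push_cast; ring : ((i : Int) + 1) = ((i + 1 : Nat) : Int)), PySem.List.slice_to_natCast,
      (by push_cast; ring : ((i : Int) + 2) = (((i + 1) + 1 : Nat) : Int)), PySem.List.slice_from_natCast]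
  rw [hsl, SI_iff]
  have hlent : (s.take (i+1) ++ s.drop ((i+1)+1)).length = s.length - 1 := by
    simp [List.length_take, List.length_drop]; omega
  have hget := getD_remove s (i+1)
  constructor
  · intro H
    constructor
    · by_cases hb : s.length ≤ i + 2
      · exact Or.inl hb
      · refine Or.inr ?_
        have h := H i (by rw [hlent]; omega)
        simp only [Pb, decide_eq_true_eq] at h
        rw [hget i hlen, hget (i+1) hlen, if_pos (by omega), if_neg (by omega)] at h
        rw [(by omega : i + 1 + 1 = i + 2)] at h
        omega
    · intro k hk1 hk2
      have h := H (k-1) (by rw [hlent]; omega)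
      simp only [Pb, decide_eq_true_eq] at h ⊢
      rw [hget (k-1) hlen, hget (k-1+1) hlen] at h
      rw [(by omega : k - 1 + 1 = k)] at h
      rw [if_neg (by omega), if_neg (by omega)] at h
      omega
  · rintro ⟨hL, hR⟩ j hj
    rw [hlent] at hj
    simp only [Pb, decide_eq_true_eq]
    rw [hget j hlen, hget (j+1) hlen]
    rcases Nat.lt_trichotomy (j+1) (i+1) with hcase | hcase | hcase
    · rw [if_pos (by omega), if_pos hcase]
      have := hmin j (by omega)
      simp only [Pb, decide_eq_true_eq] at this
      omega
    · rw [if_pos (by omega), if_neg (by omega)]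
      have hji : j = i := by omega
      subst hji
      rw [(by omega : j + 1 + 1 = j + 2)]
      rcases hL with hL | hL
      · omega
      · omega
    · rw [if_neg (by omega), if_neg (by omega)]
      have := hR (j+1) (by omega) (by omega)
      simp only [Pb, decide_eq_true_eq] at this
      omega

-- ===== VERDICT (by name: the statement is the Claim_ definition above) =====
theorem solution_spec : Claim_equal_solution := by
  intro s _
  unfold Spec_solution solution
  rw [intLenSub, masterB]
  have hA := masterA s (s.length - 1) 0
  simp only [Nat.cast_zero, Nat.zero_add] at hA
  rw [hA]
  cases hF : (List.range' 0 (s.length - 1)).filter (Pb s) with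
  | nil => rfl
  | cons i rest =>
    obtain ⟨-, hilt, hmin0, hPi, hrest⟩ := filter_range'_cons (Pb s) (s.length - 1) 0 i rest hF
    simp only [Nat.zero_add] at hilt hrest
    have hmin : ∀ k, k < i → ¬ Pb s k = true := fun k hk => hmin0 k (Nat.zero_le k) hk
    -- rest = [] ↔ no violation in [i+1, len-1)
    have hrest_nil : rest.isEmpty = true ↔ (∀ k, i + 1 ≤ k → k < s.length - 1 → ¬ Pb s k = true) := by
      rw [List.isEmpty_iff, hrest, List.filter_eq_nil_iff]
      constructor
      · intro h k hk1 hk2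
        exact h k (by rw [List.mem_range'_1]; omega)
      · intro h k hk
        rw [List.mem_range'_1] at hk
        exact h k (by omega) (by omega)
    -- rest.all (== i+1) ↔ no violation in [i+2, len-1)
    have hrest_all : rest.all (fun j => j == i + 1) = true ↔ (∀ k, i + 2 ≤ k → k < s.length - 1 → ¬ Pb s k = true) := by
      rw [List.all_eq_true]
      constructor
      · intro h k hk1 hk2 hPk
        have hkm : k ∈ rest := by
          rw [hrest, List.mem_filter, List.mem_range'_1]
          exact ⟨⟨by omega, by omega⟩, hPk⟩
        have := h k hkm
        rw [beq_iff_eq] at this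
        omega
      · intro h k hk
        rw [hrest, List.mem_filter, List.mem_range'_1] at hk
        obtain ⟨⟨hk1, hk2⟩, hPk⟩ := hk
        rw [beq_iff_eq]
        by_contra hne
        exact h k (by omega) (by omega) hPk
    rw [Bool.eq_iff_iff]
    simp only [Bool.or_eq_true, Bool.and_eq_true, decide_eq_true_eq]
    rw [SI_left s i hilt hmin, SI_right s i hilt hmin, hrest_nil, hrest_all]
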